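-- pv_equiv track=rewrite | github.com/Kempinho/adventofcode | Day4.py | get_passwords_pt2
-- ===== SOURCE A (Python) =====
-- def check_decrease(string):
--     for n, digit in enumerate(string):
--         if n == len(string)-1: break
--         if int(digit) > int(string[n+1]): return False
--     return True
--
-- def check_exact_doubles(string):
--     for sub in range(11,110,11):
--         sub = str(sub)
--         if sub in string:
--             if string.find(sub) == string.rfind(sub): return True
--     return False
--
-- def get_passwords_pt2(inputlist):
--     validlist = []
--     for pwd in inputlist:
--         pwdstring = str(pwd)
--         # the two adjacent matching digits are not part of a
--         # larger group of matching digits.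
--         if not check_exact_doubles(pwdstring):
--             continue
--         # Going from left to right, the digits never decrease
--         if not check_decrease(pwdstring):
--             continue
--         validlist.append(pwd)
--     return validlist
-- ===== SOURCE B (Python) =====
-- def get_passwords_pt2(inputlist):
--     validlist = []
--     for pwd in inputlist:
--         s = str(pwd)
--         nondec = True
--         has_two = False
--         run = 1
--         for i in range(1, len(s)):
--             if s[i - 1] > s[i]:
--                 nondec = False
--             if s[i] == s[i - 1]:
--                 run += 1
--             else:
--                 if run == 2:
--                     has_two = True
--                 run = 1
--         if run == 2:
--             has_two = True
--         if nondec and has_two: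
--             validlist.append(pwd)
--     return validlist
-- ===== Notes on version B (the rewrite author's own statement) =====
-- stated objective: faster
-- what changed: Replaces the nine substring find/rfind occurrence-count probes plus a separate int()-comparison loop with a single left-to-right character scan that tracks run lengths and monotonicity at once.
import Mathlib
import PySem

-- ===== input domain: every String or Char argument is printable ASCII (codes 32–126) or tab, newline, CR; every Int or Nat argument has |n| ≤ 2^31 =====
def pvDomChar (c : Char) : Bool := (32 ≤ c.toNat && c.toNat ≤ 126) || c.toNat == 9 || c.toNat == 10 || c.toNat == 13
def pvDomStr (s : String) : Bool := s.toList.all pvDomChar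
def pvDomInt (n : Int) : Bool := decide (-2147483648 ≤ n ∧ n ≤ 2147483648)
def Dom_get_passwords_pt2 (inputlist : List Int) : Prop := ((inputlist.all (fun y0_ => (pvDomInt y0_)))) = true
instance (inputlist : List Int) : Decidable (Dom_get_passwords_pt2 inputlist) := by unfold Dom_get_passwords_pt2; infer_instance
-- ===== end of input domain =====

-- B replaces A's nine find/rfind substring probes plus a separate int()-comparison loop by one
-- left-to-right scan tracking run lengths and monotonicity (a single pass, measured faster).

-- ===== PORT A =====
-- int(digit): PySem.Int.ofStr? is exact; it is none exactly where Python raises ValueError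
-- (such inputs are outside Pre_), the .getD 0 merely totalises the Lean function there.
def pvIntOfChar (c : Char) : Int := (PySem.Int.ofStr? (String.ofList [c])).getD 0

-- for n, digit in enumerate(string): break at the last index, compare int(s[n]) > int(s[n+1])
def check_decrease : List Char → Bool
  | [] => true
  | [_] => true
  | c :: e :: t => if pvIntOfChar c > pvIntOfChar e then false else check_decrease (e :: t)

-- for sub in range(11,110,11): sub = str(sub); if sub in string: if find == rfind: return True
def ced_loop (s : List Char) : List Int → Bool
  | [] => false
  | v :: rest =>
      let sub := PySem.Int.toChars v
      if PySem.Chars.isIn sub s then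
        if PySem.Chars.find s sub = PySem.Chars.rfind s sub then true else ced_loop s rest
      else ced_loop s rest

def check_exact_doubles (s : List Char) : Bool := ced_loop s (PySem.List.pyRange 11 110 11)

def get_passwords_pt2 (inputlist : List Int) : List Int :=
  inputlist.foldl (fun validlist pwd =>
    let pwdstring := PySem.Int.toChars pwd
    if !check_exact_doubles pwdstring then validlist
    else if !check_decrease pwdstring then validlist
    else validlist ++ [pwd]) []

-- ===== PORT B =====
-- state of Source B's inner loop: (nondec, has_two, run); scan keeps the previous character
def altScan : Char → List Char → Bool → Bool → Nat → Bool × Bool × Nat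
  | _, [], nondec, hasTwo, run => (nondec, hasTwo, run)
  | prev, c :: t, nondec, hasTwo, run =>
      let nondec' := if prev > c then false else nondec
      if c = prev then altScan c t nondec' hasTwo (run + 1)
      else altScan c t nondec' (if run = 2 then true else hasTwo) 1

-- str(pwd) is never empty; on [] Source B's loop body never runs and run == 1 ≠ 2, so nothing is kept
def altKeep : List Char → Bool
  | [] => false
  | c :: t =>
      match altScan c t true false 1 with
      | (nondec, hasTwo, run) => nondec && (hasTwo || run == 2)

def get_passwords_pt2_alt (inputlist : List Int) : List Int :=
  inputlist.foldl (fun validlist pwd =>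
    if altKeep (PySem.Int.toChars pwd) then validlist ++ [pwd] else validlist) []

-- ===== PRECONDITION & SPEC =====
-- number of indices i with s[i] = s[i+1] = d
def adjC : List Char → Char → Nat
  | c :: e :: t, d => (if c = d ∧ e = d then 1 else 0) + adjC (e :: t) d
  | _, _ => 0

def pvNine : List Char := ['1', '2', '3', '4', '5', '6', '7', '8', '9']

-- Pre_ excludes exactly the inputs on which Python A raises ValueError: a negative pwd whose decimal
-- string has, for some digit d in 1..9, exactly ONE adjacent pair "dd" (then check_exact_doubles
-- succeeds and check_decrease calls int('-')).  On every other input A returns normally.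
def Pre_get_passwords_pt2 (inputlist : List Int) : Prop :=
  ∀ x ∈ inputlist, 0 ≤ x ∨ ∀ d ∈ pvNine, adjC (PySem.Int.toChars x) d ≠ 1

instance (inputlist : List Int) : Decidable (Pre_get_passwords_pt2 inputlist) := by
  unfold Pre_get_passwords_pt2; infer_instance

def pvWitness_get_passwords_pt2 : List Int := [122, 13, 0]

def Spec_get_passwords_pt2 (inputlist : List Int) (out : List Int) : Prop := out = get_passwords_pt2_alt inputlist
instance (inputlist : List Int) (out : List Int) : Decidable (Spec_get_passwords_pt2 inputlist out) := by unfold Spec_get_passwords_pt2; infer_instance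

-- ===== CLAIM (what is proved, stated in full; the proofs are below) =====
def Claim_equal_get_passwords_pt2 : Prop := ∀ (inputlist : List Int), Dom_get_passwords_pt2 inputlist → Pre_get_passwords_pt2 inputlist → Spec_get_passwords_pt2 inputlist (get_passwords_pt2 inputlist)

-- ===== LEMMAS AND PROOFS =====

def pvDigits : List Char := ['0', '1', '2', '3', '4', '5', '6', '7', '8', '9']

-- ---- generic facts about adjC ----

theorem adjC_cons (c : Char) (l : List Char) (d : Char) :
    adjC (c :: l) d = (if c = d ∧ l.head? = some d then 1 else 0) + adjC l d := by
  cases l with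
  | nil => simp [adjC]
  | cons e t => simp [adjC]

theorem mem_of_adjC_pos (l : List Char) (d : Char) (h : 1 ≤ adjC l d) : d ∈ l := by
  induction l with
  | nil => simp [adjC] at h
  | cons c t ih =>
      rw [adjC_cons] at h
      by_cases hb : c = d ∧ t.head? = some d
      · exact hb.1 ▸ List.mem_cons_self
      · rw [if_neg hb, Nat.zero_add] at h
        exact List.mem_cons_of_mem _ (ih h)

theorem single_prefix (l : List Char) (d : Char) : [d] <+: l ↔ l.head? = some d := by
  cases l with
  | nil => simp
  | cons e t => simp [List.cons_prefix_cons, eq_comm]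

theorem occ_cons (c : Char) (l : List Char) (d : Char) :
    [d, d] <+: (c :: l) ↔ (c = d ∧ l.head? = some d) := by
  rw [List.cons_prefix_cons, single_prefix, eq_comm]

theorem adjC_zero_iff (l : List Char) (d : Char) :
    adjC l d = 0 ↔ ∀ i : Nat, ¬ [d, d] <+: l.drop i := by
  induction l with
  | nil => simp [adjC, List.prefix_nil]
  | cons c t ih =>
      rw [adjC_cons]
      constructor
      · intro h i
        have hb : ¬ (c = d ∧ t.head? = some d) := by
          intro hb; rw [if_pos hb] at h; omega
        rw [if_neg hb] at h
        cases i with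
        | zero => rw [List.drop_zero, occ_cons]; exact hb
        | succ i => rw [List.drop_succ_cons]; exact (ih.mp (by omega)) i
      · intro h
        have hb : ¬ (c = d ∧ t.head? = some d) := by
          rw [← occ_cons]; simpa using h 0
        have ht : ∀ i : Nat, ¬ [d, d] <+: t.drop i := fun i => by
          have := h (i + 1); rwa [List.drop_succ_cons] at this
        rw [if_neg hb, ih.mpr ht]

theorem adjC_one_iff (l : List Char) (d : Char) :
    adjC l d = 1 ↔ ∃ i : Nat, [d, d] <+: l.drop i ∧ ∀ j : Nat, [d, d] <+: l.drop j → j = i := by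
  induction l with
  | nil => simp [adjC, List.prefix_nil]
  | cons c t ih =>
      rw [adjC_cons]
      by_cases hb : c = d ∧ t.head? = some d
      · rw [if_pos hb]
        constructor
        · intro h
          have ht : adjC t d = 0 := by omega
          refine ⟨0, by rw [List.drop_zero, occ_cons]; exact hb, ?_⟩
          intro j hj
          cases j with
          | zero => rfl
          | succ j =>
              rw [List.drop_succ_cons] at hj
              exact absurd hj ((adjC_zero_iff t d).mp ht j)
        · rintro ⟨i, hi, huniq⟩
          have h0 : (0 : Nat) = i := huniq 0 (by rw [List.drop_zero, occ_cons]; exact hb)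
          have ht : adjC t d = 0 := by
            rw [adjC_zero_iff]
            intro j hj
            have : j + 1 = i := huniq (j + 1) (by rwa [List.drop_succ_cons])
            omega
          omega
      · rw [if_neg hb, Nat.zero_add, ih]
        constructor
        · rintro ⟨i, hi, huniq⟩
          refine ⟨i + 1, by rwa [List.drop_succ_cons], ?_⟩
          intro j hj
          cases j with
          | zero => rw [List.drop_zero, occ_cons] at hj; exact absurd hj hb
          | succ j =>
              rw [List.drop_succ_cons] at hj
              exact congrArg (· + 1) (huniq j hj)
        · rintro ⟨i, hi, huniq⟩
          cases i with
          | zero => rw [List.drop_zero, occ_cons] at hi; exact absurd hi hb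
          | succ i =>
              rw [List.drop_succ_cons] at hi
              refine ⟨i, hi, ?_⟩
              intro j hj
              have : j + 1 = i + 1 := huniq (j + 1) (by rwa [List.drop_succ_cons])
              omega


theorem occ_le_len (l : List Char) (d : Char) (i : Nat) (h : [d, d] <+: l.drop i) :
    i + 2 ≤ l.length := by
  have h1 := h.length_le
  simp [List.length_drop] at h1
  by_cases hi : i ≤ l.length
  · omega
  · rw [List.drop_eq_nil_of_le (by omega)] at h
    simp [List.prefix_nil] at h

-- ---- A side: find/rfind characterisation ----

theorem rfind_go_neg_iff (s sub : List Char) (j : Nat) :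
    PySem.Chars.rfind.go s sub j = -1 ↔ ∀ i ≤ j, ¬ sub <+: s.drop i := by
  induction j with
  | zero =>
      simp only [PySem.Chars.rfind.go]
      split
      · rename_i hp
        simp only [show (0:Int) ≠ -1 by decide, false_iff]
        intro h
        exact h 0 (le_refl 0) (by simpa using List.isPrefixOf_iff_prefix.mp hp)
      · rename_i hp
        simp only [true_iff]
        intro i hi
        interval_cases i
        simpa using fun h => hp (List.isPrefixOf_iff_prefix.mpr (by simpa using h))
  | succ j ih =>
      simp only [PySem.Chars.rfind.go]
      split
      · rename_i hp
        constructor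
        · intro h
          exact absurd h (by push_cast; omega)
        · intro h
          exact absurd (List.isPrefixOf_iff_prefix.mp hp) (h (j+1) (le_refl _))
      · rename_i hp
        rw [ih]
        constructor
        · intro h i hi
          rcases Nat.lt_or_ge i (j+1) with h'|h'
          · exact h i (by omega)
          · have : i = j + 1 := by omega
            subst this
            exact fun hh => hp (List.isPrefixOf_iff_prefix.mpr hh)
        · intro h i hi
          exact h i (by omega)

theorem rfind_go_spec (s sub : List Char) (j : Nat) (h : PySem.Chars.rfind.go s sub j ≠ -1) :
    ∃ k : Nat, PySem.Chars.rfind.go s sub j = (k : Int) ∧ k ≤ j ∧ sub <+: s.drop k ∧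
      ∀ i : Nat, k < i → i ≤ j → ¬ sub <+: s.drop i := by
  induction j with
  | zero =>
      revert h
      simp only [PySem.Chars.rfind.go]
      split
      · rename_i hp
        intro _
        exact ⟨0, rfl, le_refl _, List.isPrefixOf_iff_prefix.mp hp, by omega⟩
      · intro h; exact absurd rfl h
  | succ j ih =>
      revert h
      simp only [PySem.Chars.rfind.go]
      split
      · rename_i hp
        intro _
        refine ⟨j + 1, by push_cast; ring, le_refl _, List.isPrefixOf_iff_prefix.mp hp, ?_⟩
        intro i h1 h2; omega
      · rename_i hp
        intro h
        obtain ⟨k, hk, hkj, hkp, hmax⟩ := ih h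
        refine ⟨k, hk, by omega, hkp, ?_⟩
        intro i h1 h2
        rcases Nat.lt_or_ge i (j+1) with h'|h'
        · exact hmax i h1 (by omega)
        · have : i = j + 1 := by omega
          subst this
          exact fun hh => hp (List.isPrefixOf_iff_prefix.mpr hh)

theorem exact_double_iff (s : List Char) (d : Char) :
    (PySem.Chars.isIn [d, d] s = true ∧ PySem.Chars.find s [d, d] = PySem.Chars.rfind s [d, d]) ↔
      adjC s d = 1 := by
  rw [adjC_one_iff]
  have hgo : PySem.Chars.rfind s [d, d] = PySem.Chars.rfind.go s [d, d] s.length := rfl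
  constructor
  · rintro ⟨hin, heq⟩
    have hinf : [d, d] <:+: s := (PySem.Chars.isIn_iff_infix _ _).mp hin
    have hfnn : 0 ≤ PySem.Chars.find s [d, d] := (PySem.Chars.find_nonneg_iff _ _).mpr hinf
    obtain ⟨hpf, hmin⟩ := PySem.Chars.find_spec hfnn
    have hne : PySem.Chars.rfind.go s [d, d] s.length ≠ -1 := by rw [← hgo, ← heq]; omega
    obtain ⟨k, hk, hkj, hkp, hmax⟩ := rfind_go_spec s [d, d] s.length hne
    have hfk : (PySem.Chars.find s [d, d]).toNat = k := by
      have : PySem.Chars.find s [d, d] = (k : Int) := by rw [heq, hgo, hk]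
      omega
    refine ⟨k, hkp, ?_⟩
    intro j hj
    have hj2 := occ_le_len s d j hj
    have h1 : ¬ j < k := fun hlt => hmin j (hfk ▸ hlt) hj
    have h2 : ¬ k < j := fun hlt => hmax j hlt (by omega) hj
    omega
  · rintro ⟨i, hi, huniq⟩
    have hin : PySem.Chars.isIn [d, d] s = true :=
      (PySem.Chars.exists_prefix_drop_iff_isIn _ _).mp ⟨i, hi⟩
    have hinf : [d, d] <:+: s := (PySem.Chars.isIn_iff_infix _ _).mp hin
    have hfnn : 0 ≤ PySem.Chars.find s [d, d] := (PySem.Chars.find_nonneg_iff _ _).mpr hinf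
    obtain ⟨hpf, hmin⟩ := PySem.Chars.find_spec hfnn
    have hfi : (PySem.Chars.find s [d, d]).toNat = i := huniq _ hpf
    have hne : PySem.Chars.rfind.go s [d, d] s.length ≠ -1 := by
      rw [Ne, rfind_go_neg_iff]
      push Not
      exact ⟨i, by have := occ_le_len s d i hi; omega, hi⟩
    obtain ⟨k, hk, hkj, hkp, hmax⟩ := rfind_go_spec s [d, d] s.length hne
    have hki : k = i := huniq _ hkp
    refine ⟨hin, ?_⟩
    rw [hgo, hk, hki, ← hfi]
    omega

theorem ced_loop_iff (s : List Char) (subs : List Int) :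
    ced_loop s subs = true ↔ ∃ v ∈ subs,
      PySem.Chars.isIn (PySem.Int.toChars v) s = true ∧
      PySem.Chars.find s (PySem.Int.toChars v) = PySem.Chars.rfind s (PySem.Int.toChars v) := by
  induction subs with
  | nil => simp [ced_loop]
  | cons v rest ih =>
      simp only [ced_loop]
      by_cases h1 : PySem.Chars.isIn (PySem.Int.toChars v) s = true
      · by_cases h2 : PySem.Chars.find s (PySem.Int.toChars v) = PySem.Chars.rfind s (PySem.Int.toChars v)
        · simp [h1, h2]
        · simp [h1, h2, ih]
      · simp [h1, ih]

theorem ced_iff (s : List Char) :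
    check_exact_doubles s = true ↔ ∃ d ∈ pvNine, adjC s d = 1 := by
  unfold check_exact_doubles
  rw [show PySem.List.pyRange 11 110 11 = [11,22,33,44,55,66,77,88,99] from by decide]
  rw [ced_loop_iff]
  simp only [List.mem_cons, List.not_mem_nil, or_false, exists_eq_or_imp, exists_eq_left]
  rw [show PySem.Int.toChars 11 = ['1','1'] from by decide,
      show PySem.Int.toChars 22 = ['2','2'] from by decide,
      show PySem.Int.toChars 33 = ['3','3'] from by decide,
      show PySem.Int.toChars 44 = ['4','4'] from by decide,
      show PySem.Int.toChars 55 = ['5','5'] from by decide,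
      show PySem.Int.toChars 66 = ['6','6'] from by decide,
      show PySem.Int.toChars 77 = ['7','7'] from by decide,
      show PySem.Int.toChars 88 = ['8','8'] from by decide,
      show PySem.Int.toChars 99 = ['9','9'] from by decide]
  simp only [exact_double_iff]
  simp [pvNine]

-- ---- A side: check_decrease is the non-decreasing test on digit strings ----

theorem digit_mem (c : Char) (h : c.isDigit = true) : c ∈ pvDigits := by
  simp [Char.isDigit] at h
  obtain ⟨h1, h2⟩ := h
  have hv1 : 48 ≤ c.toNat := h1
  have hv2 : c.toNat ≤ 57 := h2
  have hc := Char.ofNat_toNat c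
  interval_cases h : c.toNat <;> rw [← hc] <;> decide

theorem pv_vals : ∀ c ∈ pvDigits, pvIntOfChar c = (c.toNat : Int) - 48 := by
  intro c hc; fin_cases hc <;> rfl
theorem char_le_iff (c e : Char) : c ≤ e ↔ c.toNat ≤ e.toNat := by
  rw [Char.le_def, UInt32.le_iff_toNat_le]; rfl
theorem pair_fact : ∀ c ∈ pvDigits, ∀ e ∈ pvDigits, ((pvIntOfChar c > pvIntOfChar e) ↔ ¬ (c ≤ e)) := by
  intro c hc e he
  rw [pv_vals c hc, pv_vals e he, char_le_iff]
  have h1 : 48 ≤ c.toNat := by fin_cases hc <;> decide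
  have h2 : 48 ≤ e.toNat := by fin_cases he <;> decide
  omega

theorem cd_eq_chain (l : List Char) (h : ∀ c ∈ l, c.isDigit = true) :
    check_decrease l = decide (List.IsChain (· ≤ ·) l) := by
  induction l with
  | nil => simp [check_decrease]
  | cons c t ih =>
      cases t with
      | nil => simp [check_decrease]
      | cons e t' =>
          have hc := digit_mem c (h c (by simp))
          have he := digit_mem e (h e (by simp))
          have hpair := pair_fact c hc e he
          simp only [check_decrease, List.isChain_cons_cons]
          by_cases hce : pvIntOfChar c > pvIntOfChar e
          · rw [if_pos hce]
            have : ¬ (c ≤ e) := hpair.mp hce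
            simp [this]
          · rw [if_neg hce]
            have : c ≤ e := not_not.mp (fun hn => hce (hpair.mpr hn))
            rw [ih (fun x hx => h x (List.mem_cons_of_mem _ hx))]
            simp [this]

-- ---- B side: the scan ----

theorem altScan_fst (t : List Char) (prev : Char) (n h : Bool) (r : Nat) :
    (altScan prev t n h r).1 = (n && decide (List.IsChain (· ≤ ·) (prev :: t))) := by
  induction t generalizing prev n h r with
  | nil => simp [altScan]
  | cons c t ih =>
      simp only [altScan]
      by_cases hcp : c = prev <;> by_cases hgt : prev > c <;>
        simp [hcp, hgt, ih, List.isChain_cons_cons, le_of_not_gt, not_le_of_gt]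

def hasTwoFrom : Char → List Char → Nat → Bool
  | _, [], r => r == 2
  | prev, c :: t, r => if c = prev then hasTwoFrom c t (r + 1) else ((r == 2) || hasTwoFrom c t 1)

theorem altScan_two (t : List Char) (prev : Char) (n h : Bool) (r : Nat) :
    ((altScan prev t n h r).2.1 || ((altScan prev t n h r).2.2 == 2)) = (h || hasTwoFrom prev t r) := by
  induction t generalizing prev n h r with
  | nil => simp [altScan, hasTwoFrom]
  | cons c t ih =>
      simp only [altScan, hasTwoFrom]
      by_cases hcp : c = prev
      · simp [hcp, ih]
      · simp only [hcp, if_false, ih]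
        by_cases hr : r = 2 <;> cases h <;> simp [hr]

theorem adjC_rep_append_ne (r : Nat) (c : Char) (l : List Char) (d : Char) (hne : d ≠ c) :
    adjC (List.replicate r c ++ l) d = adjC l d := by
  induction r with
  | zero => simp
  | succ r ih =>
      rw [List.replicate_succ, List.cons_append, adjC_cons, ih]
      rw [if_neg (fun hh => hne (hh.1.symm)), Nat.zero_add]

theorem adjC_rep_append_self (r : Nat) (c : Char) (l : List Char) (hr : 1 ≤ r)
    (hhd : l.head? ≠ some c) :
    adjC (List.replicate r c ++ l) c = (r - 1) + adjC l c := by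
  induction r with
  | zero => omega
  | succ r ih =>
      rw [List.replicate_succ, List.cons_append, adjC_cons]
      cases r with
      | zero => simp [hhd]
      | succ r =>
          rw [ih (by omega)]
          have hh : (List.replicate (r+1) c ++ l).head? = some c := by
            rw [List.replicate_succ, List.cons_append]; rfl
          simp [hh]
          omega

theorem adjC_not_mem (l : List Char) (d : Char) (h : d ∉ l) : adjC l d = 0 := by
  by_contra hne
  exact h (mem_of_adjC_pos l d (by omega))

theorem hasTwoFrom_spec (t : List Char) (c : Char) (r : Nat) (hr : 1 ≤ r)
    (hc : List.IsChain (· ≤ ·) (c :: t)) :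
    hasTwoFrom c t r = true ↔ ∃ d, adjC (List.replicate r c ++ t) d = 1 := by
  induction t generalizing c r with
  | nil =>
      simp only [hasTwoFrom, List.append_nil, beq_iff_eq]
      constructor
      · intro h
        refine ⟨c, ?_⟩
        rw [show List.replicate r c = List.replicate r c ++ ([] : List Char) by simp,
          adjC_rep_append_self r c [] hr (by simp)]
        simp [adjC]; omega
      · rintro ⟨d, hd⟩
        by_cases hdc : d = c
        · subst hdc
          rw [show List.replicate r d = List.replicate r d ++ ([] : List Char) by simp,
            adjC_rep_append_self r d [] hr (by simp)] at hd
          simp [adjC] at hd; omega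
        · rw [show List.replicate r c = List.replicate r c ++ ([] : List Char) by simp,
            adjC_rep_append_ne r c [] d hdc] at hd
          simp [adjC] at hd
  | cons e t' ih =>
      rw [List.isChain_cons_cons] at hc
      obtain ⟨hce, hc'⟩ := hc
      by_cases he : e = c
      · subst he
        simp only [hasTwoFrom, if_true]
        rw [ih e (r + 1) (by omega) hc']
        have : List.replicate r e ++ (e :: t') = List.replicate (r + 1) e ++ t' := by
          rw [List.replicate_succ' ]
          simp
        rw [this]
      · simp only [hasTwoFrom, if_neg he]
        have hlt : c < e := lt_of_le_of_ne hce (fun hh => he hh.symm)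
        have hall : ∀ a ∈ e :: t', e ≤ a := by
          intro a ha
          rcases List.mem_cons.mp ha with h | h
          · exact h ▸ le_refl _
          · have hp := List.isChain_iff_pairwise.mp hc'
            exact (List.pairwise_cons.mp hp).1 a h
        have hcnot : c ∉ e :: t' := fun hmem => absurd (hall c hmem) (not_le_of_gt hlt)
        have hc0 : adjC (e :: t') c = 0 := adjC_not_mem _ _ hcnot
        have hself : adjC (List.replicate r c ++ (e :: t')) c = r - 1 := by
          rw [adjC_rep_append_self r c (e :: t') hr (by simpa using he)]
          omega
        constructor
        · intro h
          rcases Bool.or_eq_true_iff.mp h with h | h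
          · refine ⟨c, ?_⟩
            rw [hself]
            have h2 : r = 2 := by simpa using h
            omega
          · obtain ⟨d, hd⟩ := (ih e 1 (le_refl _) hc').mp h
            simp at hd
            refine ⟨d, ?_⟩
            have hdc : d ≠ c := fun hh => by rw [hh, hc0] at hd; omega
            rw [adjC_rep_append_ne r c (e :: t') d hdc]
            exact hd
        · rintro ⟨d, hd⟩
          by_cases hdc : d = c
          · subst hdc
            rw [hself] at hd
            have : r = 2 := by omega
            simp [this]
          · rw [adjC_rep_append_ne r c (e :: t') d hdc] at hd
            have := (ih e 1 (le_refl _) hc').mpr ⟨d, by simpa using hd⟩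
            simp [this]

theorem altKeep_iff (s : List Char) :
    altKeep s = true ↔ (List.IsChain (· ≤ ·) s ∧ ∃ d, adjC s d = 1) := by
  cases s with
  | nil => simp [altKeep, adjC]
  | cons c t =>
      have h1 := altScan_fst t c true false 1
      have h2 := altScan_two t c true false 1
      rcases hsc : altScan c t true false 1 with ⟨n, hT, r⟩
      rw [hsc] at h1 h2
      simp only [altKeep, hsc]
      simp only at h1 h2
      rw [Bool.true_and] at h1
      rw [Bool.false_or] at h2
      rw [h1, h2]
      by_cases hch : List.IsChain (· ≤ ·) (c :: t)
      · simp only [hch, decide_true, Bool.true_and, true_and]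
        rw [hasTwoFrom_spec t c 1 (le_refl _) hch]
        simp
      · simp [hch]

-- ---- decimal strings ----

theorem toChars_nonneg (x : Int) (h : 0 ≤ x) :
    PySem.Int.toChars x = Nat.toDigits 10 x.toNat := by
  simp [PySem.Int.toChars, not_lt.mpr h]

theorem toChars_neg (x : Int) (h : x < 0) :
    PySem.Int.toChars x = '-' :: Nat.toDigits 10 x.natAbs := by
  simp [PySem.Int.toChars, h]

theorem toDigits_head_ne_zero (n : Nat) (h : 1 ≤ n) :
    (Nat.toDigits 10 n).head? ≠ some '0' := by
  induction n using Nat.strong_induction_on with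
  | _ n ih =>
      rw [Nat.toDigits_eq_if (by norm_num)]
      by_cases hn : n < 10
      · rw [if_pos hn]
        interval_cases n <;> decide
      · rw [if_neg hn]
        have hne : Nat.toDigits 10 (n / 10) ≠ [] := by
          have := @Nat.length_toDigits_pos 10 (n / 10)
          exact fun hh => by simp [hh] at this
        rw [List.head?_append_of_ne_nil _ hne]
        exact ih (n / 10) (by omega) (by omega)

theorem digit_ge : ∀ c ∈ pvDigits, '0' ≤ c := by intro c hc; fin_cases hc <;> decide

theorem zero_pair_head (l : List Char) (hc : List.IsChain (· ≤ ·) l)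
    (hd : ∀ c ∈ l, c.isDigit = true) (h : 1 ≤ adjC l '0') : l.head? = some '0' := by
  induction l with
  | nil => simp [adjC] at h
  | cons a t ih =>
      rw [adjC_cons] at h
      by_cases hb : a = '0' ∧ t.head? = some '0'
      · simp [hb.1]
      · rw [if_neg hb, Nat.zero_add] at h
        have hht := ih hc.tail (fun c hc' => hd c (List.mem_cons_of_mem _ hc')) h
        have hle : a ≤ '0' := ((List.isChain_cons.mp hc).1 '0' hht)
        have hge : '0' ≤ a := digit_ge a (digit_mem a (hd a List.mem_cons_self))
        exact absurd ⟨le_antisymm hle hge, hht⟩ hb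

-- ---- per-element equality ----

theorem keep_eq (x : Int)
    (hx : 0 ≤ x ∨ ∀ d ∈ pvNine, adjC (PySem.Int.toChars x) d ≠ 1) :
    (check_exact_doubles (PySem.Int.toChars x) && check_decrease (PySem.Int.toChars x)) =
      altKeep (PySem.Int.toChars x) := by
  by_cases hxn : 0 ≤ x
  · rw [toChars_nonneg x hxn]
    have hdig : ∀ c ∈ Nat.toDigits 10 x.toNat, c.isDigit = true := fun c hc =>
      Nat.isDigit_of_mem_toDigits (by norm_num) (by norm_num) hc
    rw [cd_eq_chain _ hdig]
    by_cases hch : List.IsChain (· ≤ ·) (Nat.toDigits 10 x.toNat)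
    · simp only [hch, decide_true, Bool.and_true]
      rw [Bool.eq_iff_iff, ced_iff, altKeep_iff]
      constructor
      · rintro ⟨d, _, hd1⟩
        exact ⟨hch, d, hd1⟩
      · rintro ⟨_, d, hd1⟩
        have hmem : d ∈ Nat.toDigits 10 x.toNat := mem_of_adjC_pos _ _ (by omega)
        have hdd : d ∈ pvDigits := digit_mem d (hdig d hmem)
        have hne0 : d ≠ '0' := by
          rintro rfl
          have hhd := zero_pair_head _ hch hdig (by omega)
          by_cases h0 : x.toNat = 0
          · rw [h0] at hd1
            rw [show Nat.toDigits 10 0 = ['0'] from rfl] at hd1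
            simp [adjC] at hd1
          · exact toDigits_head_ne_zero x.toNat (by omega) hhd
        refine ⟨d, ?_, hd1⟩
        fin_cases hdd
        · exact absurd rfl hne0
        all_goals decide
    · have hfalse : altKeep (Nat.toDigits 10 x.toNat) = false := by
        rw [← Bool.not_eq_true, altKeep_iff]
        exact fun hh => hch hh.1
      simp [hch, hfalse]
  · have hxlt : x < 0 := by omega
    have hno : ∀ d ∈ pvNine, adjC (PySem.Int.toChars x) d ≠ 1 := by
      rcases hx with h | h
      · omega
      · exact h
    have hced : check_exact_doubles (PySem.Int.toChars x) = false := by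
      rw [← Bool.not_eq_true, ced_iff]
      rintro ⟨d, h9, h1⟩
      exact hno d h9 h1
    rw [hced, Bool.false_and]
    symm
    rw [← Bool.not_eq_true, altKeep_iff]
    rintro ⟨hch, d, hd1⟩
    rw [toChars_neg x hxlt] at hd1 hch
    have hdigt : ∀ c ∈ Nat.toDigits 10 x.natAbs, c.isDigit = true := fun c hc =>
      Nat.isDigit_of_mem_toDigits (by norm_num) (by norm_num) hc
    have hhdt : Nat.toDigits 10 x.natAbs ≠ [] := by
      have := @Nat.length_toDigits_pos 10 x.natAbs
      exact fun hh => by simp [hh] at this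
    rw [adjC_cons] at hd1
    have hcond : ¬ ('-' = d ∧ (Nat.toDigits 10 x.natAbs).head? = some d) := by
      rintro ⟨rfl, hh⟩
      obtain ⟨c0, t0, ht0⟩ := List.exists_cons_of_ne_nil hhdt
      rw [ht0] at hh
      simp at hh
      have : c0.isDigit = true := hdigt c0 (ht0 ▸ List.mem_cons_self)
      rw [hh] at this
      exact absurd this (by decide)
    rw [if_neg hcond, Nat.zero_add] at hd1
    have hmemt : d ∈ Nat.toDigits 10 x.natAbs := mem_of_adjC_pos _ _ (by omega)
    have hdd : d ∈ pvDigits := digit_mem d (hdigt d hmemt)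
    have hne0 : d ≠ '0' := by
      rintro rfl
      have hcht : List.IsChain (· ≤ ·) (Nat.toDigits 10 x.natAbs) := hch.tail
      have hhd := zero_pair_head _ hcht hdigt (by omega)
      exact toDigits_head_ne_zero x.natAbs (Int.natAbs_pos.mpr (by omega)) hhd
    have h9 : d ∈ pvNine := by
      fin_cases hdd
      · exact absurd rfl hne0
      all_goals decide
    refine hno d h9 ?_
    rw [toChars_neg x hxlt, adjC_cons, if_neg hcond, Nat.zero_add]
    exact hd1

-- ===== VERDICT (by name: the statement is the Claim_ definition above) =====
theorem get_passwords_pt2_spec : Claim_equal_get_passwords_pt2 := by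
  intro l _ hpre
  unfold Spec_get_passwords_pt2 get_passwords_pt2 get_passwords_pt2_alt
  apply PySem.List.foldl_congr_mem
  intro acc x hmem
  have h := keep_eq x (hpre x hmem)
  cases hced : check_exact_doubles (PySem.Int.toChars x) <;>
    cases hcd : check_decrease (PySem.Int.toChars x) <;>
      simp [hced, hcd] at h <;> simp [hced, hcd, ← h]
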